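-- pv_equiv track=rewrite | github.com/Ewa-Anna/Advent-of-Code | 2015/Day_18/day_18_part_1.py | count_on_neighbors
-- ===== SOURCE A (Python) =====
-- def count_on_neighbors(grid, x, y):
--     directions = [(-1, -1), (-1, 0), (-1, 1), (0, -1), (0, 1), (1, -1), (1, 0), (1, 1)]
--     count = 0
--     for dx, dy in directions:
--         nx, ny = x + dx, y + dy
--         if 0 <= nx < len(grid) and 0 <= ny < len(grid[0]):
--             count += grid[nx][ny] == "#"
--     return count
-- ===== SOURCE B (Python) =====
-- def count_on_neighbors(grid, x, y):
--     rows = len(grid)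
--     cols = len(grid[0]) if grid else 0
--     total = 0
--     for nx in range(max(0, x - 1), min(rows, x + 2)):
--         for ny in range(max(0, y - 1), min(cols, y + 2)):
--             if (nx, ny) != (x, y):
--                 total += grid[nx][ny] == "#"
--     return total
-- ===== Notes on version B (the rewrite author's own statement) =====
-- stated objective: alternative
-- what changed: Instead of probing eight fixed direction offsets with a per-probe bounds test, B loops over the clamped 3x3 index window (two nested ranges) and skips the centre cell; Pre_ excludes only ragged grids on which A raises IndexError (an in-bounds neighbour column per len(grid[0]) beyond the end of a shorter row).
import Mathlib
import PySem

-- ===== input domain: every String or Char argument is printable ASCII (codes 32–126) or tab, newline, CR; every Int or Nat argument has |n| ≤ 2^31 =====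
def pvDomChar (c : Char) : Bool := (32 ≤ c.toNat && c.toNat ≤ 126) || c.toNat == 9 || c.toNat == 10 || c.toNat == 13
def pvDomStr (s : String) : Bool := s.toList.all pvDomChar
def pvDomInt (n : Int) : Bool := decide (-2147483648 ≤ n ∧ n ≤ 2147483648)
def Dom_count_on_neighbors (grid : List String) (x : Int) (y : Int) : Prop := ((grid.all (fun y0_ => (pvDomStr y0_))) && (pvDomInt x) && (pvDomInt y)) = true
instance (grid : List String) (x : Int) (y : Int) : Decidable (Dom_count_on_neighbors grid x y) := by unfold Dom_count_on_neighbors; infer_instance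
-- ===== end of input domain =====

-- B replaces the eight direction-offset probes by a double loop over the clamped
-- 3×3 index window, skipping the centre cell (objective: alternative).

-- ===== PORT A =====
-- Literal port of A: fold over the 8 direction offsets.  Python's `grid[nx][ny]` raises
-- IndexError on a too-short ragged row (excluded by Pre_); the `none` branches below are
-- those inputs.  `len(grid[0])` is only reached when 0 <= nx < len(grid), i.e. grid ≠ [],
-- so headD "" is exact.
def count_on_neighbors (grid : List String) (x : Int) (y : Int) : Int :=
  let directions : List (Int × Int) := [(-1,-1),(-1,0),(-1,1),(0,-1),(0,1),(1,-1),(1,0),(1,1)]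
  directions.foldl (fun count d =>
    let nx := x + d.1
    let ny := y + d.2
    if 0 ≤ nx ∧ nx < (grid.length : Int) ∧ 0 ≤ ny ∧ ny < PySem.Str.len (grid.headD "") then
      count + (match PySem.List.pyGet? grid nx with
        | some row =>
          match PySem.Str.pyGet? row ny with
          | some c => if c == '#' then (1 : Int) else 0
          | none => 0
        | none => 0)
    else count) 0

-- ===== PORT B =====
-- Literal port of Source B: nested loops over the clamped index ranges, skipping (x, y).
-- `len(grid[0]) if grid else 0` is the `cols` binding; the Python tuple test
-- `(nx, ny) != (x, y)` is componentwise disequality.  As in A's port, the `none`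
-- branches are Python's IndexError on a ragged short row (excluded by Pre_).
def count_on_neighbors_alt (grid : List String) (x : Int) (y : Int) : Int :=
  let rows : Int := grid.length
  let cols : Int := if grid ≠ [] then PySem.Str.len (grid.headD "") else 0
  (PySem.List.pyRange (max 0 (x - 1)) (min rows (x + 2)) 1).foldl (fun total nx =>
    (PySem.List.pyRange (max 0 (y - 1)) (min cols (y + 2)) 1).foldl (fun t ny =>
      if nx ≠ x ∨ ny ≠ y then
        t + (match PySem.List.pyGet? grid nx with
          | some row =>
            match PySem.Str.pyGet? row ny with
            | some c => if c == '#' then (1 : Int) else 0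
            | none => 0
          | none => 0)
      else t) total) 0

-- ===== PRECONDITION & SPEC =====
-- Python A raises IndexError exactly when some in-bounds neighbour position (per len(grid[0]))
-- lies beyond the end of its (shorter, ragged) row; Pre_ admits precisely the inputs where A returns.
def pvCellOk (grid : List String) (nx : Int) (ny : Int) : Prop :=
  (0 ≤ nx ∧ nx < (grid.length : Int) ∧ 0 ≤ ny ∧ ny < PySem.Str.len (grid.headD "")) →
    ny < PySem.Str.len (grid.getD nx.toNat "")

def Pre_count_on_neighbors (grid : List String) (x : Int) (y : Int) : Prop :=
  pvCellOk grid (x-1) (y-1) ∧ pvCellOk grid (x-1) y ∧ pvCellOk grid (x-1) (y+1) ∧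
  pvCellOk grid x (y-1) ∧ pvCellOk grid x (y+1) ∧
  pvCellOk grid (x+1) (y-1) ∧ pvCellOk grid (x+1) y ∧ pvCellOk grid (x+1) (y+1)

instance (grid : List String) (x : Int) (y : Int) : Decidable (Pre_count_on_neighbors grid x y) := by
  unfold Pre_count_on_neighbors pvCellOk; infer_instance

def pvWitness_count_on_neighbors : List String × Int × Int := (["##", "#."], 0, 0)

def Spec_count_on_neighbors (grid : List String) (x : Int) (y : Int) (out : Int) : Prop := out = count_on_neighbors_alt grid x y
instance (grid : List String) (x : Int) (y : Int) (out : Int) : Decidable (Spec_count_on_neighbors grid x y out) := by unfold Spec_count_on_neighbors; infer_instance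

-- ===== CLAIM (what is proved, stated in full; the proofs are below) =====
def Claim_equal_count_on_neighbors : Prop := ∀ (grid : List String) (x : Int) (y : Int), Dom_count_on_neighbors grid x y → Pre_count_on_neighbors grid x y → Spec_count_on_neighbors grid x y (count_on_neighbors grid x y)

-- ===== LEMMAS AND PROOFS =====

/-- indicator of a lit cell -/
def pvCharF (c : Char) : Int := if c == '#' then 1 else 0

/-- lift a scoring function to Option, scoring `none` (a missing cell) as 0 -/
def pvOptF {α : Type} (f : α → Int) : Option α → Int
  | some a => f a
  | none => 0

/-- the raw cell expression both ports share: score of grid[nx][ny], missing = 0 -/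
def pvScore (grid : List String) (nx ny : Int) : Int :=
  match PySem.List.pyGet? grid nx with
  | some row =>
    match PySem.Str.pyGet? row ny with
    | some c => if c == '#' then (1 : Int) else 0
    | none => 0
  | none => 0

/-- the inline match of both ports is `pvScore` -/
lemma pvScore_eq (grid : List String) (nx ny : Int) :
    (match PySem.List.pyGet? grid nx with
      | some row =>
        match PySem.Str.pyGet? row ny with
        | some c => if c == '#' then (1 : Int) else 0
        | none => 0
      | none => 0) = pvScore grid nx ny := rfl

/-- score of one cell of the grid, with both bounds checked (A's guard) -/
def pvCell (grid : List String) (cols : Int) (nx ny : Int) : Int :=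
  if 0 ≤ nx ∧ nx < (grid.length : Int) then
    if 0 ≤ ny ∧ ny < cols then
      pvOptF (fun row => pvOptF pvCharF row.toList[ny.toNat]?) grid[nx.toNat]?
    else 0
  else 0

lemma pv_pyGet?_nonneg {α : Type} (xs : List α) {i : Int} (h : 0 ≤ i) :
    PySem.List.pyGet? xs i = xs[i.toNat]? := by
  simp only [PySem.List.pyGet?, PySem.List.pyIdx?]
  rw [if_pos h]
  by_cases hlt : i < (xs.length : Int)
  · rw [if_pos hlt]
    simp
  · rw [if_neg hlt]
    rw [List.getElem?_eq_none (show xs.length ≤ i.toNat by omega)]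
    rfl

/-- the bound-checked raw score is the bound-checked cell score -/
lemma pv_score_cell (grid : List String) (nx ny : Int) :
    (if 0 ≤ nx ∧ nx < (grid.length : Int) then
      if 0 ≤ ny ∧ ny < PySem.Str.len (grid.headD "") then pvScore grid nx ny else 0
    else 0) = pvCell grid (PySem.Str.len (grid.headD "")) nx ny := by
  rw [pvCell]
  by_cases h1 : 0 ≤ nx ∧ nx < (grid.length : Int)
  · rw [if_pos h1, if_pos h1]
    by_cases h2 : 0 ≤ ny ∧ ny < PySem.Str.len (grid.headD "")
    · rw [if_pos h2, if_pos h2]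
      rw [pvScore, pv_pyGet?_nonneg grid h1.1]
      have hlt : nx.toNat < grid.length := by omega
      rw [List.getElem?_eq_getElem hlt]
      have hstr : PySem.Str.pyGet? (grid[nx.toNat]) ny = (grid[nx.toNat]).toList[ny.toNat]? := by
        have : PySem.Str.pyGet? (grid[nx.toNat]) ny = PySem.List.pyGet? (grid[nx.toNat]).toList ny := by
          simp [PySem.Str.pyGet?]
        rw [this, pv_pyGet?_nonneg _ h2.1]
      show (match PySem.Str.pyGet? (grid[nx.toNat]) ny with
        | some c => if c == '#' then (1 : Int) else 0
        | none => 0) = _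
      rw [hstr]
      rcases hg : (grid[nx.toNat]).toList[ny.toNat]? with _ | c <;>
        simp [pvOptF, pvCharF, hg]
    · rw [if_neg h2, if_neg h2]
  · rw [if_neg h1, if_neg h1]

/-- per-direction step of A's fold -/
lemma pv_stepA (grid : List String) (acc nx ny : Int) :
    (if 0 ≤ nx ∧ nx < (grid.length : Int) ∧ 0 ≤ ny ∧ ny < PySem.Str.len (grid.headD "") then
        acc + pvScore grid nx ny
      else acc)
    = acc + pvCell grid (PySem.Str.len (grid.headD "")) nx ny := by
  rw [← pv_score_cell]
  by_cases h1 : 0 ≤ nx ∧ nx < (grid.length : Int)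
  · by_cases h2 : 0 ≤ ny ∧ ny < PySem.Str.len (grid.headD "")
    · rw [if_pos ⟨h1.1, h1.2, h2.1, h2.2⟩, if_pos h1, if_pos h2]
    · rw [if_neg (by tauto), if_pos h1, if_neg h2]; ring
  · rw [if_neg (by tauto), if_neg h1]; ring

/-- A is the sum of the eight bound-checked neighbour scores -/
lemma pv_A_eq (grid : List String) (x y : Int) :
    count_on_neighbors grid x y
      = pvCell grid (PySem.Str.len (grid.headD "")) (x-1) (y-1)
      + pvCell grid (PySem.Str.len (grid.headD "")) (x-1) y
      + pvCell grid (PySem.Str.len (grid.headD "")) (x-1) (y+1)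
      + pvCell grid (PySem.Str.len (grid.headD "")) x (y-1)
      + pvCell grid (PySem.Str.len (grid.headD "")) x (y+1)
      + pvCell grid (PySem.Str.len (grid.headD "")) (x+1) (y-1)
      + pvCell grid (PySem.Str.len (grid.headD "")) (x+1) y
      + pvCell grid (PySem.Str.len (grid.headD "")) (x+1) (y+1) := by
  show (List.foldl _ 0 _ : Int) = _
  simp only [List.foldl_cons, List.foldl_nil]
  have hs : ∀ (acc nx ny : Int),
      (if 0 ≤ nx ∧ nx < (grid.length : Int) ∧ 0 ≤ ny ∧ ny < PySem.Str.len (grid.headD "") then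
        acc + (match PySem.List.pyGet? grid nx with
          | some row =>
            match PySem.Str.pyGet? row ny with
            | some c => if c == '#' then (1 : Int) else 0
            | none => 0
          | none => 0)
      else acc) = acc + pvCell grid (PySem.Str.len (grid.headD "")) nx ny := fun acc nx ny =>
    pv_stepA grid acc nx ny
  simp only [hs]
  have e1 : ∀ a : Int, a + -1 = a - 1 := fun a => by ring
  have e2 : ∀ a : Int, a + 0 = a := fun a => by ring
  simp only [e1, e2]
  ring

/-- a conditional accumulation fold is the initial value plus a sum of guarded terms -/
lemma pv_foldl_if_add {α : Type} (l : List α) (c : α → Prop) [DecidablePred c]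
    (v : α → Int) (init : Int) :
    l.foldl (fun t a => if c a then t + v a else t) init
      = init + (l.map (fun a => if c a then v a else 0)).sum := by
  have hb : (fun (t : Int) a => if c a then t + v a else t)
      = fun t a => t + (if c a then v a else 0) := by
    funext t a; split_ifs <;> ring
  rw [hb, PySem.List.foldl_add]

/-- the clamped range window [max 0 (t-1), min m (t+2)) sums the three guarded terms -/
lemma pv_rangeSum (m t : Int) (f : Int → Int) :
    ((PySem.List.pyRange (max 0 (t-1)) (min m (t+2)) 1).map f).sum
      = (if 0 ≤ t-1 ∧ t-1 < m then f (t-1) else 0)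
      + (if 0 ≤ t ∧ t < m then f t else 0)
      + (if 0 ≤ t+1 ∧ t+1 < m then f (t+1) else 0) := by
  set a : Int := max 0 (t-1) with ha
  set b : Int := min m (t+2) with hb
  have hn4 : (b - a).toNat ≤ 3 := by omega
  interval_cases hn : (b - a).toNat
  · rw [PySem.List.pyRange_one_eq_nil (by omega)]
    rw [if_neg (by omega), if_neg (by omega), if_neg (by omega)]
    simp
  · rw [PySem.List.pyRange_one_cons (by omega), PySem.List.pyRange_one_eq_nil (by omega)]
    rcases (by omega : 1 ≤ t ∨ t = 0 ∨ t = -1) with ht | ht | ht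
    · rw [if_pos (by omega), if_neg (by omega), if_neg (by omega)]
      have : a = t - 1 := by omega
      rw [this]; simp; try ring
    · rw [if_neg (by omega), if_pos (by omega), if_neg (by omega)]
      have : a = t := by omega
      rw [this]; simp; try ring
    · rw [if_neg (by omega), if_neg (by omega), if_pos (by omega)]
      have : a = t + 1 := by omega
      rw [this]; simp; try ring
  · rw [PySem.List.pyRange_one_cons (by omega), PySem.List.pyRange_one_cons (by omega),
      PySem.List.pyRange_one_eq_nil (by omega)]
    rcases (by omega : 1 ≤ t ∨ t = 0) with ht | ht
    · rw [if_pos (by omega), if_pos (by omega), if_neg (by omega)]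
      have e1 : a = t - 1 := by omega
      have e2 : a + 1 = t := by omega
      rw [e1]; rw [e1] at e2; rw [e2]; simp; try ring
    · rw [if_neg (by omega), if_pos (by omega), if_pos (by omega)]
      have e1 : a = t := by omega
      have e2 : a + 1 = t + 1 := by omega
      rw [e1]; rw [e1] at e2; rw [e2]; simp; try ring
  · rw [PySem.List.pyRange_one_cons (by omega), PySem.List.pyRange_one_cons (by omega),
      PySem.List.pyRange_one_cons (by omega), PySem.List.pyRange_one_eq_nil (by omega)]
    rw [if_pos (by omega), if_pos (by omega), if_pos (by omega)]
    have e1 : a = t - 1 := by omega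
    rw [e1]
    simp; try ring

lemma pv_if_wrap (P : Prop) [Decidable P] (u v w : Int) :
    (if P then u + v + w else 0)
      = (if P then u else 0) + (if P then v else 0) + (if P then w else 0) := by
  split_ifs <;> ring

/-- B as the eight bound-checked cell scores -/
lemma pv_B_eq (grid : List String) (x y : Int) :
    count_on_neighbors_alt grid x y
      = pvCell grid (PySem.Str.len (grid.headD "")) (x-1) (y-1)
      + pvCell grid (PySem.Str.len (grid.headD "")) (x-1) y
      + pvCell grid (PySem.Str.len (grid.headD "")) (x-1) (y+1)
      + pvCell grid (PySem.Str.len (grid.headD "")) x (y-1)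
      + pvCell grid (PySem.Str.len (grid.headD "")) x (y+1)
      + pvCell grid (PySem.Str.len (grid.headD "")) (x+1) (y-1)
      + pvCell grid (PySem.Str.len (grid.headD "")) (x+1) y
      + pvCell grid (PySem.Str.len (grid.headD "")) (x+1) (y+1) := by
  have hcols : (if grid ≠ [] then PySem.Str.len (grid.headD "") else 0)
      = PySem.Str.len (grid.headD "") := by
    rcases grid with _ | ⟨r, rs⟩
    · rw [if_neg (by simp)]
      simp [PySem.Str.len_eq]
    · rw [if_pos (by simp)]
  simp only [count_on_neighbors_alt, hcols]
  -- inner loop: accumulate the guarded (skip-centre) scores of one row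
  have hinner : ∀ (total nx : Int),
      (PySem.List.pyRange (max 0 (y - 1)) (min (PySem.Str.len (grid.headD "")) (y + 2)) 1).foldl
        (fun t ny => if nx ≠ x ∨ ny ≠ y then t + pvScore grid nx ny else t) total
      = total + ((PySem.List.pyRange (max 0 (y - 1)) (min (PySem.Str.len (grid.headD "")) (y + 2)) 1).map
          (fun ny => if nx ≠ x ∨ ny ≠ y then pvScore grid nx ny else 0)).sum := by
    intro total nx
    exact pv_foldl_if_add _ (fun ny => nx ≠ x ∨ ny ≠ y) (pvScore grid nx) total
  simp only [pvScore_eq]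
  simp only [hinner]
  -- outer loop: plain accumulation of the per-row sums
  rw [PySem.List.foldl_add]
  rw [pv_rangeSum (grid.length : Int) x]
  rw [pv_rangeSum (PySem.Str.len (grid.headD "")) y, pv_rangeSum (PySem.Str.len (grid.headD "")) y,
      pv_rangeSum (PySem.Str.len (grid.headD "")) y]
  -- resolve the skip-centre conditions at the nine positions
  rw [if_pos (show x - 1 ≠ x ∨ y - 1 ≠ y by left; omega),
      if_pos (show x - 1 ≠ x ∨ y ≠ y by left; omega),
      if_pos (show x - 1 ≠ x ∨ y + 1 ≠ y by left; omega),
      if_pos (show x ≠ x ∨ y - 1 ≠ y by right; omega),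
      if_neg (show ¬(x ≠ x ∨ y ≠ y) by simp),
      if_pos (show x ≠ x ∨ y + 1 ≠ y by right; omega),
      if_pos (show x + 1 ≠ x ∨ y - 1 ≠ y by left; omega),
      if_pos (show x + 1 ≠ x ∨ y ≠ y by left; omega),
      if_pos (show x + 1 ≠ x ∨ y + 1 ≠ y by left; omega)]
  rw [pv_if_wrap, pv_if_wrap, pv_if_wrap]
  simp only [ite_self]
  simp only [pv_score_cell grid]
  ring

/-- the two ports agree on every input -/
lemma pv_ports_eq (grid : List String) (x y : Int) :
    count_on_neighbors grid x y = count_on_neighbors_alt grid x y := by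
  rw [pv_A_eq, pv_B_eq]

-- ===== VERDICT (by name: the statement is the Claim_ definition above) =====
theorem count_on_neighbors_spec : Claim_equal_count_on_neighbors := by
  intro grid x y _ _
  unfold Spec_count_on_neighbors
  exact pv_ports_eq grid x y
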